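-- pv_equiv track=rewrite | github.com/TGChenZP/AFLBrownlowPredictor_ML__2023 | notebooks/YangZhou.py | _get_surrounding_vectors
-- ===== SOURCE A (Python) =====
-- import copy
--
-- def _get_surrounding_vectors(core):
--     """ Helper that gets the VECTORS that moves the core to the COORDINATES that form the 3^d object around it """
--     ##ALGORITHM: how to generate all combinations of any dimensions given each dimension has different values
--     values = [-1, 0, 1]
--     new_surroundings = [[-1], [0], [1]]
--
--     for i in range(len(core) - 1):
--         old_surroundings = copy.deepcopy(new_surroundings)
--         new_surroundings = list()
--
--         for surrounding in old_surroundings: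
--             for value in values:
--                 new_surroundings.append(
--                     [surrounding[i] if i < len(surrounding) else value for i in range(len(surrounding) + 1)])
--
--     return new_surroundings
-- ===== SOURCE B (Python) =====
-- def _get_surrounding_vectors(core):
--     """Recursive decomposition over the dimension count."""
--     if len(core) <= 1:
--         return [[-1], [0], [1]]
--     prev = _get_surrounding_vectors(core[1:])
--     return [s + [v] for s in prev for v in (-1, 0, 1)]
-- ===== Notes on version B (the rewrite author's own statement) =====
-- stated objective: idiomatic
-- what changed: Replaced the iterative deepcopy-and-rebuild loop with index comprehension by a direct recursion on the dimension count that extends each (d-1)-dimensional vector with -1/0/1.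
import Mathlib
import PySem

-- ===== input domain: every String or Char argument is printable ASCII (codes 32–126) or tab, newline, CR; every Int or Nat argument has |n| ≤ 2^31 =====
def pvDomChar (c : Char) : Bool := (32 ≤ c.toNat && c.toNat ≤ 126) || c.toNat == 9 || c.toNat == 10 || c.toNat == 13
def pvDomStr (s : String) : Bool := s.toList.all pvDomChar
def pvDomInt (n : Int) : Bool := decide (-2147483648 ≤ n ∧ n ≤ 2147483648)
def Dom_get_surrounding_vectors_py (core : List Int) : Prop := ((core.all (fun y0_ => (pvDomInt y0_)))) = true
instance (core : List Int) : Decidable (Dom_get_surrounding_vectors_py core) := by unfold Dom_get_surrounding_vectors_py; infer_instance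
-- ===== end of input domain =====

-- B replaces A's iterative deepcopy-and-rebuild loop by a direct recursion on the
-- dimension count (idiomatic decomposition; same output, same order).

-- ===== PORT A =====
-- literal port of A's nested loops; the comprehension's surrounding[i] is in range
-- (i < len(surrounding) is the guard), so pyGetD is exact here
def get_surrounding_vectors_py (core : List Int) : List (List Int) :=
  (PySem.List.pyRange 0 ((core.length : Int) - 1) 1).foldl
    (fun new_surroundings _ =>
      new_surroundings.foldl
        (fun acc surrounding =>
          ([-1, 0, 1] : List Int).foldl
            (fun acc2 value =>
              acc2 ++ [(PySem.List.pyRange 0 ((surrounding.length : Int) + 1) 1).map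
                (fun i => if i < (surrounding.length : Int)
                          then PySem.List.pyGetD surrounding i 0 else value)])
            acc)
        [])
    [[-1], [0], [1]]

-- ===== PORT B =====
def get_surrounding_vectors_py_alt : List Int → List (List Int)
  | [] => [[-1], [0], [1]]
  | [_] => [[-1], [0], [1]]
  | _ :: b :: t =>
    (get_surrounding_vectors_py_alt (b :: t)).flatMap
      (fun s => ([-1, 0, 1] : List Int).map (fun v => s ++ [v]))

-- ===== PRECONDITION & SPEC =====
def Spec_get_surrounding_vectors_py (core : List Int) (out : List (List Int)) : Prop := out = get_surrounding_vectors_py_alt core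
instance (core : List Int) (out : List (List Int)) : Decidable (Spec_get_surrounding_vectors_py core out) := by unfold Spec_get_surrounding_vectors_py; infer_instance

-- ===== CLAIM (what is proved, stated in full; the proofs are below) =====
def Claim_equal_get_surrounding_vectors_py : Prop := ∀ (core : List Int), Dom_get_surrounding_vectors_py core → Spec_get_surrounding_vectors_py core (get_surrounding_vectors_py core)

-- ===== LEMMAS AND PROOFS =====

-- the comprehension builds surrounding ++ [value]
lemma pvElem_eq (s : List Int) (v : Int) :
    (PySem.List.pyRange 0 ((s.length : Int) + 1) 1).map
      (fun i => if i < (s.length : Int) then PySem.List.pyGetD s i 0 else v) = s ++ [v] := by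
  rw [PySem.List.pyRange_one_succ_right (by positivity), List.map_append]
  congr 1
  · rw [List.map_congr_left (g := fun i => PySem.List.pyGetD s i 0)
      (fun i hi => by
        have := (PySem.List.mem_pyRange_one.mp hi).2
        simp [this])]
    exact PySem.List.map_pyGetD_pyRange_zero' s 0
  · simp

-- one pass of A's loop body, as a flatMap
lemma pvStep_eq (old : List (List Int)) :
    old.foldl
      (fun acc surrounding =>
        ([-1, 0, 1] : List Int).foldl
          (fun acc2 value =>
            acc2 ++ [(PySem.List.pyRange 0 ((surrounding.length : Int) + 1) 1).map
              (fun i => if i < (surrounding.length : Int)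
                        then PySem.List.pyGetD surrounding i 0 else value)])
          acc)
      [] = old.flatMap (fun s => [s ++ [-1], s ++ [0], s ++ [1]]) := by
  simp only [List.foldl, pvElem_eq]
  have : ∀ (acc : List (List Int)) (s : List Int),
      acc ++ [s ++ [-1]] ++ [s ++ [0]] ++ [s ++ [1]]
        = acc ++ [s ++ [-1], s ++ [0], s ++ [1]] := by
    intro acc s; simp
  simp only [this]
  exact PySem.List.foldl_append_eq_flatMap _ _ _

-- a foldl that ignores the range index is function iteration
lemma pvFoldl_iterate (f : List (List Int) → List (List Int))
    (init : List (List Int)) (n : ℕ) :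
    (PySem.List.pyRange 0 (n : Int) 1).foldl (fun acc _ => f acc) init = f^[n] init := by
  induction n generalizing init with
  | zero => rw [PySem.List.pyRange_one_eq_nil (by simp)]; rfl
  | succ m ih =>
    have : ((m + 1 : ℕ) : Int) = (m : Int) + 1 := by push_cast; ring
    rw [this, PySem.List.pyRange_one_succ_right (by positivity), List.foldl_append, ih,
      Function.iterate_succ_apply']
    rfl

lemma pvMain : ∀ (core : List Int),
    get_surrounding_vectors_py core = get_surrounding_vectors_py_alt core
  | [] => by decide
  | [a] => by
    simp [get_surrounding_vectors_py, get_surrounding_vectors_py_alt,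
      PySem.List.pyRange_one_eq_nil]
  | a :: b :: t => by
    have ih := pvMain (b :: t)
    simp only [get_surrounding_vectors_py, List.length_cons] at ih ⊢
    have h1 : ((t.length + 1 + 1 : ℕ) : Int) - 1 = ((t.length + 1 : ℕ) : Int) := by
      push_cast; ring
    have h2 : ((t.length + 1 : ℕ) : Int) - 1 = ((t.length : ℕ) : Int) := by
      push_cast; ring
    rw [h1, pvFoldl_iterate] at *
    rw [h2, pvFoldl_iterate] at ih
    rw [Function.iterate_succ_apply', pvStep_eq, ih]
    show _ = get_surrounding_vectors_py_alt (a :: b :: t)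
    simp [get_surrounding_vectors_py_alt]

-- ===== VERDICT (by name: the statement is the Claim_ definition above) =====
theorem get_surrounding_vectors_py_spec : Claim_equal_get_surrounding_vectors_py := by
  intro core _
  exact pvMain core
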